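-- pv_equiv track=rewrite | github.com/darrenangle/abide | src/abide/primitives/phonetics.py | get_rhyme_part
-- ===== SOURCE A (Python) =====
-- def get_rhyme_part(phonemes: tuple[str, ...]) -> tuple[str, ...]:
--     """
--     Extract the rhyming portion from a phoneme sequence.
--
--     The rhyme part starts from the last stressed vowel to the end.
--
--     Args:
--         phonemes: Sequence of phonemes with stress markers
--
--     Returns:
--         The rhyming portion of the phonemes
--
--     Examples:
--         >>> # "night" = N AY1 T -> rhyme part is AY1 T
--         >>> phonemes = ("N", "AY1", "T")
--         >>> get_rhyme_part(phonemes)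
--         ('AY1', 'T')
--     """
--     if not phonemes:
--         return ()
--
--     # Find last stressed vowel (stress marker 1 or 2)
--     last_stressed_idx = -1
--     for i, phoneme in enumerate(phonemes):
--         if any(c in "12" for c in phoneme):
--             last_stressed_idx = i
--
--     if last_stressed_idx == -1:
--         # No stress found, try finding any vowel (has digit)
--         for i, phoneme in enumerate(phonemes):
--             if any(c.isdigit() for c in phoneme):
--                 last_stressed_idx = i
--
--     if last_stressed_idx == -1:
--         # Still nothing, return last 2 phonemes
--         return phonemes[-2:] if len(phonemes) >= 2 else phonemes
--
--     return phonemes[last_stressed_idx:]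
-- ===== SOURCE B (Python) =====
-- def _rank(p):
--     if any(c in "12" for c in p):
--         return 2
--     if any(c.isdigit() for c in p):
--         return 1
--     return 0
--
--
-- def get_rhyme_part(phonemes: tuple[str, ...]) -> tuple[str, ...]:
--     """Single pass by classification + argmax: score each phoneme (2 = stressed,
--     1 = has a digit, 0 = other) and take the lexicographic max of (score, index).
--     The highest score wins and ties go to the rightmost index, so the cut falls
--     at the last stressed phoneme, else the last digit-bearing one; score 0 means
--     no cut point exists and the last two phonemes are returned."""
--     if not phonemes:
--         return ()
--     score, idx = max((_rank(p), i) for i, p in enumerate(phonemes))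
--     return phonemes[idx:] if score else phonemes[-2:]
-- ===== Notes on version B (the rewrite author's own statement) =====
-- stated objective: alternative
-- what changed: Replaces A's two staged forward scans that each overwrite a last-seen index (stressed first, then any-digit) with a classification pass that scores every phoneme (2 = stressed, 1 = has a digit, 0 = other) and a single lexicographic max over (score, index) pairs, slicing at the winning index.
import Mathlib
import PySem

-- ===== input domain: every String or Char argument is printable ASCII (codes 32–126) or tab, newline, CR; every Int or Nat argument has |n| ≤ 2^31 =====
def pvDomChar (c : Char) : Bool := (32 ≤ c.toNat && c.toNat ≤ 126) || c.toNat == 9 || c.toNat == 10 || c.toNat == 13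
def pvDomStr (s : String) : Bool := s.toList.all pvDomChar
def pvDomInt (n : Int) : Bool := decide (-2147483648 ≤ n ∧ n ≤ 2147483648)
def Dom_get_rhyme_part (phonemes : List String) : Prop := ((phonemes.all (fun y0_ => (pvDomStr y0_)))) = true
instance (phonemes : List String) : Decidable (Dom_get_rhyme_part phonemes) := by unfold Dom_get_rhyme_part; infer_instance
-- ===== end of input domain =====

-- B replaces A's two staged index-tracking scans with classification (score 2/1/0 per phoneme) plus one lexicographic argmax; an alternative of similar cost.


-- ===== PORT A =====
-- any(c in "12" for c in phoneme)
def pvIsStress (s : String) : Bool := s.toList.any (fun c => c == '1' || c == '2')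
-- any(c.isdigit() for c in phoneme)
def pvHasDigit (s : String) : Bool := s.toList.any PySem.Chars.isdigit

-- A's forward loop: enumerate, overwriting the accumulator at every hit
def pvLoopLast (p : String → Bool) : List String → Int → Int → Int
  | [], _, acc => acc
  | x :: xs, i, acc => pvLoopLast p xs (i + 1) (if p x then i else acc)

def get_rhyme_part (phonemes : List String) : List String :=
  if phonemes = [] then []
  else
    let ls0 := pvLoopLast pvIsStress phonemes 0 (-1)
    let ls := if ls0 = -1 then pvLoopLast pvHasDigit phonemes 0 (-1) else ls0
    if ls = -1 then
      if 2 ≤ phonemes.length then PySem.List.slice phonemes (some (-2)) none else phonemes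
    else
      PySem.List.slice phonemes (some ls) none

-- ===== PORT B =====
-- _rank(p): 2 if stressed, 1 if it carries any digit, 0 otherwise
def pvRank (s : String) : Nat := if pvIsStress s then 2 else if pvHasDigit s then 1 else 0

-- One step of Python's max over (score, index) pairs: lexicographic, later element wins ties in score via its larger index
def pvMaxStep (b c : Nat × Nat) : Nat × Nat :=
  if b.1 < c.1 ∨ (b.1 = c.1 ∧ b.2 < c.2) then c else b

-- the generator ((_rank(p), i) for i, p in enumerate(phonemes))
def pvCands (l : List String) : List (Nat × Nat) :=
  l.zipIdx.map (fun ip => (pvRank ip.1, ip.2))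

def get_rhyme_part_alt (phonemes : List String) : List String :=
  if phonemes = [] then []
  else
    match pvCands phonemes with
    | [] => []   -- unreachable: phonemes ≠ [] so max has a candidate
    | c :: cs =>
      let best := cs.foldl pvMaxStep c   -- max(...) on a nonempty sequence
      if best.1 ≠ 0 then phonemes.drop best.2
      else phonemes.drop (phonemes.length - 2)   -- phonemes[-2:], n ≥ 1

-- ===== PRECONDITION & SPEC =====
def Spec_get_rhyme_part (phonemes : List String) (out : List String) : Prop := out = get_rhyme_part_alt phonemes
instance (phonemes : List String) (out : List String) : Decidable (Spec_get_rhyme_part phonemes out) := by unfold Spec_get_rhyme_part; infer_instance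

-- ===== CLAIM (what is proved, stated in full; the proofs are below) =====
def Claim_equal_get_rhyme_part : Prop := ∀ (phonemes : List String), Dom_get_rhyme_part phonemes → Spec_get_rhyme_part phonemes (get_rhyme_part phonemes)

-- ===== LEMMAS AND PROOFS =====

-- index of the LAST element satisfying p, the value A's loops compute
def pvLastIdx? (p : String → Bool) : List String → Option Nat
  | [] => none
  | x :: xs =>
    match pvLastIdx? p xs with
    | some j => some (j + 1)
    | none => if p x then some 0 else none

theorem pvLoopLast_eq (p : String → Bool) (l : List String) (i acc : Int) :
    pvLoopLast p l i acc =
      match pvLastIdx? p l with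
      | some j => i + (j : Int)
      | none => acc := by
  induction l generalizing i acc with
  | nil => simp [pvLoopLast, pvLastIdx?]
  | cons x xs ih =>
    simp only [pvLoopLast, pvLastIdx?, ih]
    cases h : pvLastIdx? p xs with
    | some j => push_cast; ring_nf
    | none => by_cases hx : p x <;> simp [hx]

theorem pvLastIdx?_append_singleton (p : String → Bool) (ys : List String) (x : String) :
    pvLastIdx? p (ys ++ [x]) = if p x then some ys.length else pvLastIdx? p ys := by
  induction ys with
  | nil => by_cases hx : p x <;> simp [pvLastIdx?, hx]
  | cons y ys ih =>
    simp only [List.cons_append, pvLastIdx?, ih]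
    by_cases hx : p x <;> simp [hx]

theorem pvLastIdx?_lt (p : String → Bool) (l : List String) (j : Nat)
    (h : pvLastIdx? p l = some j) : j < l.length := by
  induction l generalizing j with
  | nil => simp [pvLastIdx?] at h
  | cons x xs ih =>
    simp only [pvLastIdx?] at h
    cases hx : pvLastIdx? p xs with
    | some k =>
      rw [hx] at h
      have := ih k hx
      have hj : k + 1 = j := by simpa using h
      simp only [List.length_cons]
      omega
    | none =>
      rw [hx] at h
      by_cases hp : p x
      · simp [hp] at h; simp [← h]
      · simp [hp] at h

-- the value B's argmax computes, characterised through A's last-index notion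
def pvArgMax (l : List String) : Nat × Nat :=
  match pvLastIdx? pvIsStress l with
  | some j => (2, j)
  | none =>
    match pvLastIdx? pvHasDigit l with
    | some j => (1, j)
    | none => (0, l.length - 1)

-- B's fold, factored out of the port's match
def pvFoldCands (l : List String) : Nat × Nat :=
  match pvCands l with
  | [] => (0, 0)
  | c :: cs => cs.foldl pvMaxStep c

theorem pvCands_append_singleton (l : List String) (x : String) :
    pvCands (l ++ [x]) = pvCands l ++ [(pvRank x, l.length)] := by
  simp [pvCands, List.zipIdx_append, List.zipIdx]

theorem pvFoldCands_append (l : List String) (x : String) (hl : l ≠ []) :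
    pvFoldCands (l ++ [x]) = pvMaxStep (pvFoldCands l) (pvRank x, l.length) := by
  obtain ⟨c, cs, hc⟩ := List.exists_cons_of_ne_nil
    (show pvCands l ≠ [] by
      intro h
      have : l.length = 0 := by
        have := congrArg List.length h
        simpa [pvCands] using this
      exact hl (List.eq_nil_of_length_eq_zero this))
  simp [pvFoldCands, pvCands_append_singleton, hc, List.foldl_append]

theorem pvArgMax_append (l : List String) (x : String) (hl : l ≠ []) :
    pvArgMax (l ++ [x]) = pvMaxStep (pvArgMax l) (pvRank x, l.length) := by
  have hlen : 1 ≤ l.length := by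
    cases l with
    | nil => exact absurd rfl hl
    | cons a t => simp
  unfold pvArgMax
  rw [pvLastIdx?_append_singleton, pvLastIdx?_append_singleton]
  by_cases hs : pvIsStress x
  · -- rank 2: new candidate wins over anything
    simp only [hs, if_true]
    cases h1 : pvLastIdx? pvIsStress l with
    | some j =>
      have := pvLastIdx?_lt pvIsStress l j h1
      simp [pvMaxStep, pvRank, hs]
      omega
    | none =>
      cases h2 : pvLastIdx? pvHasDigit l with
      | some j => simp [pvMaxStep, pvRank, hs]
      | none => simp [pvMaxStep, pvRank, hs]
  · simp only [hs]
    by_cases hd : pvHasDigit x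
    · -- rank 1
      simp only [hd, if_true]
      cases h1 : pvLastIdx? pvIsStress l with
      | some j => simp [pvMaxStep, pvRank, hs, hd]
      | none =>
        cases h2 : pvLastIdx? pvHasDigit l with
        | some j =>
          have := pvLastIdx?_lt pvHasDigit l j h2
          simp [pvMaxStep, pvRank, hs, hd]
          omega
        | none => simp [pvMaxStep, pvRank, hs, hd]
    · -- rank 0: only the no-vowel tie advances the index
      simp only [hd]
      cases h1 : pvLastIdx? pvIsStress l with
      | some j => simp [pvMaxStep, pvRank, hs, hd]
      | none =>
        cases h2 : pvLastIdx? pvHasDigit l with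
        | some j => simp [pvMaxStep, pvRank, hs, hd]
        | none =>
          have hlt : l.length - 1 < l.length := by omega
          simp [pvMaxStep, pvRank, hs, hd, hlt]

theorem pvFoldCands_eq_argMax (l : List String) (hl : l ≠ []) :
    pvFoldCands l = pvArgMax l := by
  induction l using List.reverseRecOn with
  | nil => exact absurd rfl hl
  | append_singleton ys x ih =>
    by_cases hys : ys = []
    · subst hys
      by_cases hs : pvIsStress x
      · simp [pvFoldCands, pvCands, List.zipIdx, pvArgMax, pvLastIdx?, pvRank, hs]
      · by_cases hd : pvHasDigit x <;>
          simp [pvFoldCands, pvCands, List.zipIdx, pvArgMax, pvLastIdx?, pvRank, hs, hd]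
    · rw [pvFoldCands_append ys x hys, pvArgMax_append ys x hys, ih hys]

-- ===== VERDICT (by name: the statement is the Claim_ definition above) =====
theorem get_rhyme_part_spec : Claim_equal_get_rhyme_part := by
  intro l _
  unfold Spec_get_rhyme_part get_rhyme_part get_rhyme_part_alt
  by_cases hnil : l = []
  · simp [hnil]
  · simp only [hnil, if_false]
    obtain ⟨c, cs, hc⟩ := List.exists_cons_of_ne_nil
      (show pvCands l ≠ [] by
        intro h
        have : l.length = 0 := by
          have := congrArg List.length h
          simpa [pvCands] using this
        exact hnil (List.eq_nil_of_length_eq_zero this))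
    rw [hc]
    have hfold : cs.foldl pvMaxStep c = pvArgMax l := by
      have := pvFoldCands_eq_argMax l hnil
      rw [pvFoldCands, hc] at this
      exact this
    simp only [hfold]
    unfold pvArgMax
    cases h1 : pvLastIdx? pvIsStress l with
    | some j =>
      simp only [pvLoopLast_eq, h1, zero_add]
      rw [if_neg (show ((j : Int)) ≠ -1 by omega)]
      rw [if_neg (show ((j : Int)) ≠ -1 by omega)]
      rw [PySem.List.slice_from_natCast]
      simp
    | none =>
      simp only [pvLoopLast_eq, h1]
      simp only [if_true]
      cases h2 : pvLastIdx? pvHasDigit l with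
      | some j =>
        simp only [zero_add]
        rw [if_neg (show ((j : Int)) ≠ -1 by omega)]
        rw [PySem.List.slice_from_natCast]
        simp
      | none =>
        simp only [if_true]
        by_cases hlen : 2 ≤ l.length
        · rw [if_pos hlen, PySem.List.slice_from_neg_ofNat l 2 (by omega)]
          simp
        · have hone : l.length = 1 := by
            cases l with
            | nil => exact absurd rfl hnil
            | cons a t => cases t with
              | nil => rfl
              | cons b t' => exact absurd (by simp) hlen
          rw [if_neg hlen]
          simp [hone]
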